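-- pv_equiv track=rewrite | github.com/mm0o7/mapsa_precamp | week1/CodeForces/1616A.py | diversity
-- ===== SOURCE A (Python) =====
-- def diversity(seq: list) ->int:
--     extended_list = list(map(abs, seq))
--     converted_dic = {}
--     ans = 0
--     for i in range(len(extended_list)):
--         converted_dic[extended_list[i]] = extended_list.count(extended_list[i])
--     for key, value in converted_dic.items():
--         if key == 0 or value == 1:
--             ans += 1
--         else:
--             ans += 2
--     return ans
-- ===== SOURCE B (Python) =====
-- def diversity(seq: list) -> int:
--     # sort-then-group sweep instead of a dict of counts rebuilt by list.count
--     a = sorted(map(abs, seq))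
--     n = len(a)
--     ans = 0
--     i = 0
--     while i < n:
--         j = i + 1
--         while j < n and a[j] == a[i]:
--             j += 1
--         run = j - i
--         ans += 1 if (a[i] == 0 or run == 1) else 2
--         i = j
--     return ans
-- ===== Notes on version B (the rewrite author's own statement) =====
-- stated objective: faster
-- what changed: Replaces the dict rebuilt with a quadratic list.count per element by sorting the absolute values once and sweeping maximal runs of equal values, scoring each run directly.
import Mathlib
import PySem

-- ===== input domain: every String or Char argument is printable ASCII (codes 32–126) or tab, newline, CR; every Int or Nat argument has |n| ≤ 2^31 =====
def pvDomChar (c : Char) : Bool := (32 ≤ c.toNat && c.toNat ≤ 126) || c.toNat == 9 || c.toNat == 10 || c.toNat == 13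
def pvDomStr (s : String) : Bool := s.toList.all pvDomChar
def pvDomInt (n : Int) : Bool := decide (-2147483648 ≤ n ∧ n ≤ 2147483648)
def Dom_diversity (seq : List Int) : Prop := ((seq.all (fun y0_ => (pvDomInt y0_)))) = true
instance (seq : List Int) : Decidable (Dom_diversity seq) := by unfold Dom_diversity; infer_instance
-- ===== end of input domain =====

-- B replaces A's dict of quadratic list.count lookups by a sort-then-group single sweep (objective: faster).

-- ===== PORT A =====
def diversity (seq : List Int) : Int :=
  let extended := seq.map (fun x => |x|)
  let converted :=
    (PySem.List.pyRange 0 (PySem.List.len extended) 1).foldl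
      (fun d i =>
        d.insert (PySem.List.pyGetD extended i 0)
          ((PySem.List.count extended (PySem.List.pyGetD extended i 0) : Int)))
      PySem.Dict.empty
  converted.items.foldl
    (fun ans kv => if kv.1 = 0 ∨ kv.2 = 1 then ans + 1 else ans + 2) 0

-- ===== PORT B =====
-- the outer while loop of Source B: each step consumes one maximal run of equal values
def diversityAltGo : List Int → Int
  | [] => 0
  | x :: xs =>
    let run : Int := 1 + ((xs.takeWhile (fun y => y == x)).length : Int)
    (if x = 0 ∨ run = 1 then 1 else 2) + diversityAltGo (xs.dropWhile (fun y => y == x))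
termination_by l => l.length
decreasing_by
  simp only [List.length_cons]
  exact Nat.lt_succ_of_le (List.length_dropWhile_le _ _)

def diversity_alt (seq : List Int) : Int :=
  diversityAltGo (PySem.List.sorted (seq.map (fun x => |x|)) (fun v => v) false)

-- ===== PRECONDITION & SPEC =====
def Spec_diversity (seq : List Int) (out : Int) : Prop := out = diversity_alt seq
instance (seq : List Int) (out : Int) : Decidable (Spec_diversity seq out) := by unfold Spec_diversity; infer_instance

-- ===== CLAIM (what is proved, stated in full; the proofs are below) =====
def Claim_equal_diversity : Prop := ∀ (seq : List Int), Dom_diversity seq → Spec_diversity seq (diversity seq)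

-- ===== LEMMAS AND PROOFS =====

-- the per-value score both programs add for a distinct absolute value v of multiplicity c
def pvScore (v : Int) (c : Nat) : Int := if v = 0 ∨ c = 1 then 1 else 2

-- the dict A builds maps each key to its count, keys in first-occurrence order
theorem getD_foldl_insert_count (l : List Int) (c : Int → Int) (d : PySem.Dict Int Int)
    (v : Int) (dflt : Int) :
    (l.foldl (fun d x => d.insert x (c x)) d).getD v dflt
      = if v ∈ l then c v else d.getD v dflt := by
  induction l generalizing d with
  | nil => simp
  | cons x xs ih =>
    simp only [List.foldl_cons, ih, List.mem_cons]
    by_cases hx : v ∈ xs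
    · simp [hx]
    · simp [hx, PySem.Dict.getD_insert]
      split_ifs with h <;> simp [h]

theorem sum_map_toFinset {l : List Int} (h : l.Nodup) (f : Int → Int) :
    ∑ v ∈ l.toFinset, f v = (l.map f).sum := by
  simp [Finset.sum, List.toFinset, Multiset.toFinset, Multiset.dedup_eq_self.mpr, h]

-- A's value: sum of pvScore over the distinct absolute values
theorem diversity_eq_sum (seq : List Int) :
    diversity seq
      = ∑ v ∈ (seq.map (fun x => |x|)).toFinset,
          pvScore v ((seq.map (fun x => |x|)).count v) := by
  unfold diversity
  dsimp only
  set a := seq.map (fun x => |x|) with ha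
  rw [PySem.List.foldl_pyRange_zero_pyGetD a 0
    (fun d x => d.insert x ((PySem.List.count a x : Int))) PySem.Dict.empty]
  set dct := a.foldl (fun d x => d.insert x ((PySem.List.count a x : Int))) PySem.Dict.empty with hdct
  have hkeys : dct.keys = PySem.Set.ofList a := by
    rw [hdct, PySem.Dict.keys_foldl_insert]
    simp [PySem.Set.update_nil_left]
  have hnodup : dct.keys.Nodup := by
    rw [hdct]
    exact PySem.Dict.nodup_keys_foldl_insert a _ _ (by simp)
  have hitems : dct.items = dct.keys.map (fun k => (k, dct.getD k 0)) :=
    PySem.Dict.items_eq_map_keys dct hnodup 0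
  rw [hitems, hkeys]
  have hgetD : ∀ k ∈ PySem.Set.ofList a, dct.getD k 0 = ((a.count k : Nat) : Int) := by
    intro k hk
    rw [hdct, getD_foldl_insert_count]
    rw [if_pos (by simpa using (PySem.Set.mem_ofList _ _).mp hk)]
    simp [PySem.List.count_eq]
  rw [show List.map (fun k => (k, dct.getD k 0)) (PySem.Set.ofList a)
      = List.map (fun k => (k, ((a.count k : Nat) : Int))) (PySem.Set.ofList a) from
    List.map_congr_left (fun k hk => by rw [hgetD k hk])]
  rw [PySem.List.foldl_congr_mem _
    (fun ans kv => if kv.1 = 0 ∨ kv.2 = 1 then ans + 1 else ans + 2)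
    (fun acc (kv : Int × Int) => acc + (if kv.1 = 0 ∨ kv.2 = 1 then (1 : Int) else 2))
    0 (fun acc kv _ => by dsimp only; split_ifs <;> rfl)]
  rw [PySem.List.foldl_add, List.map_map]
  have hfs : (PySem.Set.ofList a).toFinset = a.toFinset := by
    apply Finset.ext
    intro v
    simp [PySem.Set.mem_ofList]
  rw [← hfs, sum_map_toFinset (PySem.Set.nodup_ofList a)
    (fun v => pvScore v (a.count v)), zero_add]
  congr 1
  apply List.map_congr_left
  intro k _
  simp only [Function.comp, pvScore]
  have : (((a.count k : Nat) : Int) = 1) ↔ (a.count k = 1) := Nat.cast_eq_one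
  exact (if_congr (by rw [this]) rfl rfl).symm

-- sorted-list facts ------------------------------------------------------

theorem dropWhile_gt {x : Int} {xs : List Int} (hs : xs.Pairwise (· ≤ ·))
    (hx : ∀ y ∈ xs, x ≤ y) :
    ∀ y ∈ xs.dropWhile (fun y => y == x), x < y := by
  induction xs with
  | nil => simp
  | cons z zs ih =>
    intro y hy
    by_cases hz : z = x
    · rw [List.dropWhile_cons_of_pos (by simp [hz])] at hy
      exact ih hs.of_cons (fun y h => hx y (List.mem_cons_of_mem _ h)) y hy
    · rw [List.dropWhile_cons_of_neg (by simp [hz])] at hy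
      have hxz : x < z := lt_of_le_of_ne (hx z (List.mem_cons_self)) (Ne.symm hz)
      rcases List.mem_cons.mp hy with rfl | hmem
      · exact hxz
      · exact lt_of_lt_of_le hxz (List.rel_of_pairwise_cons hs hmem)

theorem count_run (x : Int) (xs : List Int)
    (hd : ∀ y ∈ xs.dropWhile (fun y => y == x), x < y) :
    (x :: xs).count x = (xs.takeWhile (fun y => y == x)).length + 1 := by
  have hsplit := List.takeWhile_append_dropWhile (p := fun y => y == x) (l := xs)
  have ht : (xs.takeWhile (fun y => y == x)).count x
      = (xs.takeWhile (fun y => y == x)).length :=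
    List.count_eq_length.mpr (fun b hb =>
      (beq_iff_eq.mp (List.mem_takeWhile_imp (p := fun y => y == x) (l := xs) hb)).symm)
  have hd0 : (xs.dropWhile (fun y => y == x)).count x = 0 :=
    List.count_eq_zero.mpr (fun hmem => lt_irrefl x (hd x hmem))
  have hxs : xs.count x = (xs.takeWhile (fun y => y == x)).length := by
    conv_lhs => rw [← hsplit]
    rw [List.count_append, ht, hd0]
    omega
  rw [List.count_cons_self, hxs]

-- B's sweep over a sorted list computes the same sum
theorem go_eq_sum (s : List Int) (hs : s.Pairwise (· ≤ ·)) :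
    diversityAltGo s = ∑ v ∈ s.toFinset, pvScore v (s.count v) := by
  induction s using diversityAltGo.induct with
  | case1 => simp [diversityAltGo]
  | case2 x xs ih =>
    rw [List.pairwise_cons] at hs
    obtain ⟨hx, hxs⟩ := hs
    have hd : ∀ y ∈ xs.dropWhile (fun y => y == x), x < y := dropWhile_gt hxs hx
    have hdsorted : (xs.dropWhile (fun y => y == x)).Pairwise (· ≤ ·) :=
      List.Pairwise.sublist (List.dropWhile_sublist _) hxs
    have htall : ∀ y ∈ xs.takeWhile (fun y => y == x), y = x := fun y hy =>
      beq_iff_eq.mp (List.mem_takeWhile_imp (p := fun y => y == x) (l := xs) hy)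
    have hsplit := List.takeWhile_append_dropWhile (p := fun y => y == x) (l := xs)
    -- the distinct values of x :: xs are x plus those of the tail past the run
    have hfin : (x :: xs).toFinset = insert x (xs.dropWhile (fun y => y == x)).toFinset := by
      apply Finset.ext
      intro v
      simp only [List.mem_toFinset, Finset.mem_insert, List.mem_cons]
      constructor
      · rintro (rfl | hv)
        · exact Or.inl rfl
        · rw [← hsplit] at hv
          rcases List.mem_append.mp hv with h | h
          · exact Or.inl (htall v h)
          · exact Or.inr (by simpa using h)
      · rintro (rfl | hv)
        · exact Or.inl rfl
        · exact Or.inr (by rw [← hsplit]; exact List.mem_append_right _ (by simpa using hv))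
    have hxnot : x ∉ (xs.dropWhile (fun y => y == x)).toFinset := by
      rw [List.mem_toFinset]
      intro hmem
      exact lt_irrefl x (hd x hmem)
    have hcnt : ∀ v ∈ (xs.dropWhile (fun y => y == x)).toFinset,
        (x :: xs).count v = (xs.dropWhile (fun y => y == x)).count v := by
      intro v hv
      rw [List.mem_toFinset] at hv
      have hvx : x ≠ v := ne_of_lt (hd v hv)
      have ht0 : (xs.takeWhile (fun y => y == x)).count v = 0 :=
        List.count_eq_zero.mpr (fun hmem => hvx ((htall v hmem).symm))
      have hvc : (x :: xs).count v = xs.count v := by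
        simp [hvx]
      rw [hvc]
      conv_lhs => rw [← hsplit]
      rw [List.count_append, ht0, Nat.zero_add]
    have hsum : ∑ v ∈ (xs.dropWhile (fun y => y == x)).toFinset, pvScore v ((x :: xs).count v)
        = ∑ v ∈ (xs.dropWhile (fun y => y == x)).toFinset,
            pvScore v ((xs.dropWhile (fun y => y == x)).count v) :=
      Finset.sum_congr rfl (fun v hv => by rw [hcnt v hv])
    rw [hfin, Finset.sum_insert hxnot, hsum, ← ih hdsorted, count_run x xs hd]
    rw [diversityAltGo]
    congr 1
    simp only [pvScore]
    have hiff : (x = 0 ∨ (1 : Int) + ((xs.takeWhile (fun y => y == x)).length : Int) = 1)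
        ↔ (x = 0 ∨ (xs.takeWhile (fun y => y == x)).length + 1 = 1) := by
      constructor <;> rintro (h | h) <;> [left; right; left; right] <;> omega
    exact if_congr hiff rfl rfl

-- ===== VERDICT (by name: the statement is the Claim_ definition above) =====
theorem diversity_spec : Claim_equal_diversity := by
  intro seq _
  unfold Spec_diversity diversity_alt
  have hperm : (PySem.List.sorted (seq.map (fun x => |x|)) (fun v => v) false).Perm
      (seq.map (fun x => |x|)) := PySem.List.sorted_perm _ _ _
  rw [go_eq_sum _ (by simpa using PySem.List.sorted_pairwise (seq.map (fun x => |x|)) (fun v => v)),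
    diversity_eq_sum]
  rw [List.toFinset_eq_of_perm _ _ hperm]
  exact Finset.sum_congr rfl (fun v _ => by rw [hperm.count_eq])
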